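-- pv_equiv track=rewrite | github.com/rodrigosemicolon/AlgInfTheory | assignment_1/src/backup.py | get_stran
-- ===== SOURCE A (Python) =====
-- def get_stran(data,thresh):
--     blocks=[]
--     i=0
--     flag = [False for i in data]
--     for i in range(len(data)):
--         if data[i]>=thresh and not flag[i]:
--             val=data[i]
--             beg=i
--             end=i
--             for j in range(i+1,len(data)):
--                 if data[j]>=thresh:
--                     val+=data[j]
--                     flag[j]=True
--                     end=j
--                 else:
--                     break
--             if beg!=end:
--                 blocks.append(((beg,end),val))
--         flag[i]=True
--
--
--     return blocks
-- ===== SOURCE B (Python) =====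
-- def get_stran(data, thresh):
--     blocks = []
--     start = None
--     end = 0
--     val = 0
--     for i, x in enumerate(data):
--         if x >= thresh:
--             if start is None:
--                 start, end, val = i, i, x
--             else:
--                 val += x
--                 end = i
--         else:
--             if start is not None and start != end:
--                 blocks.append(((start, end), val))
--             start = None
--     if start is not None and start != end:
--         blocks.append(((start, end), val))
--     return blocks
-- ===== Notes on version B (the rewrite author's own statement) =====
-- stated objective: simpler
-- what changed: Replaced the nested scan with a flag array (restart-from-i inner loop marking visited indices) by a single enumerate pass maintaining only the current run's start/end/sum, flushed on run end and after the loop.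
import Mathlib
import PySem

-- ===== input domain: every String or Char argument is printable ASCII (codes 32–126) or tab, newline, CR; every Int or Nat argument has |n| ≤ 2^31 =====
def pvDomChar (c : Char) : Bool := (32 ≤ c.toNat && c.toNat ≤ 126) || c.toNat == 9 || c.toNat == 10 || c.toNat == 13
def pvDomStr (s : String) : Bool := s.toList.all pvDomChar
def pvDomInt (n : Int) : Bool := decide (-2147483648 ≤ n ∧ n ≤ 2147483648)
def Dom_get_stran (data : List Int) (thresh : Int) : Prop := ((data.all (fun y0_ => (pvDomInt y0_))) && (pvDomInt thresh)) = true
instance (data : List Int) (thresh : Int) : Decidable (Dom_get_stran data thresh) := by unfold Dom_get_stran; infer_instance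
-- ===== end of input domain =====

-- B replaces A's flag array and restart-from-i inner scan by a single pass keeping only the current run's start/end/sum (objective: simpler).

-- ===== PORT A =====
-- inner loop: `for j in range(i+1, len(data)): … else: break`; fuel = len(data) - j, so the loop stops at len(data)
def pvInner (data : List Int) (thresh : Int) : Nat → Nat → Int → Nat → List Bool → Int × Nat × List Bool
  | 0, _j, val, e, flag => (val, e, flag)
  | fuel + 1, j, val, e, flag =>
    if data.getD j 0 ≥ thresh then
      pvInner data thresh fuel (j + 1) (val + data.getD j 0) j (flag.set j true)
    else (val, e, flag)

-- outer loop: `for i in range(len(data))`; fuel = len(data) - i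
def pvOuter (data : List Int) (thresh : Int) : Nat → Nat → List ((Int × Int) × Int) → List Bool → List ((Int × Int) × Int)
  | 0, _i, blocks, _flag => blocks
  | fuel + 1, i, blocks, flag =>
    if data.getD i 0 ≥ thresh ∧ flag.getD i false = false then
      let r := pvInner data thresh (data.length - (i + 1)) (i + 1) (data.getD i 0) i flag
      let blocks' := if i ≠ r.2.1 then blocks ++ [(((i : Int), (r.2.1 : Int)), r.1)] else blocks
      pvOuter data thresh fuel (i + 1) blocks' (r.2.2.set i true)
    else
      pvOuter data thresh fuel (i + 1) blocks (flag.set i true)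

def get_stran (data : List Int) (thresh : Int) : List ((Int × Int) × Int) :=
  pvOuter data thresh data.length 0 [] (List.replicate data.length false)

-- ===== PORT B =====
-- `enumerate(data)`
def pvEnum : Nat → List Int → List (Nat × Int)
  | _, [] => []
  | i, x :: rest => (i, x) :: pvEnum (i + 1) rest

-- `if start is not None and start != end: blocks.append(((start, end), val))`
def pvFlush (blocks : List ((Int × Int) × Int)) (st : Option Nat) (e : Nat) (val : Int) : List ((Int × Int) × Int) :=
  match st with
  | some s => if s ≠ e then blocks ++ [(((s : Int), (e : Int)), val)] else blocks
  | none => blocks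

-- loop body of B's single pass; state = (blocks, start, end, val)
def pvAltStep (thresh : Int) (acc : List ((Int × Int) × Int) × Option Nat × Nat × Int) (ix : Nat × Int) :
    List ((Int × Int) × Int) × Option Nat × Nat × Int :=
  let (blocks, st, e, val) := acc
  let (i, x) := ix
  if x ≥ thresh then
    match st with
    | none => (blocks, some i, i, x)
    | some s => (blocks, some s, i, val + x)
  else (pvFlush blocks st e val, none, e, val)

def get_stran_alt (data : List Int) (thresh : Int) : List ((Int × Int) × Int) :=
  let fin := (pvEnum 0 data).foldl (pvAltStep thresh) ([], none, 0, 0)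
  pvFlush fin.1 fin.2.1 fin.2.2.1 fin.2.2.2

-- ===== PRECONDITION & SPEC =====
def Spec_get_stran (data : List Int) (thresh : Int) (out : List ((Int × Int) × Int)) : Prop := out = get_stran_alt data thresh
instance (data : List Int) (thresh : Int) (out : List ((Int × Int) × Int)) : Decidable (Spec_get_stran data thresh out) := by unfold Spec_get_stran; infer_instance

-- ===== CLAIM (what is proved, stated in full; the proofs are below) =====
def Claim_equal_get_stran : Prop := ∀ (data : List Int) (thresh : Int), Dom_get_stran data thresh → Spec_get_stran data thresh (get_stran data thresh)

-- ===== LEMMAS AND PROOFS =====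

-- Common ladder: the maximal runs ≥ thresh of length ≥ 2, recursing run by run.
def pvRuns (thresh : Int) : List Int → Nat → List ((Int × Int) × Int)
  | [], _ => []
  | x :: rest, i =>
    if thresh ≤ x then
      (if (rest.takeWhile (fun y => thresh ≤ y)).length = 0 then []
       else [(((i : Int), ((i + (rest.takeWhile (fun y => thresh ≤ y)).length : Nat) : Int)),
              x + (rest.takeWhile (fun y => thresh ≤ y)).sum)])
        ++ pvRuns thresh (rest.dropWhile (fun y => thresh ≤ y)) (i + 1 + (rest.takeWhile (fun y => thresh ≤ y)).length)
    else pvRuns thresh rest (i + 1)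
termination_by l _ => l.length
decreasing_by
  · exact Nat.lt_succ_of_le (List.length_dropWhile_le _ _)
  · simp

lemma pvDropWhile_eq_drop {α : Type} (p : α → Bool) (l : List α) :
    l.dropWhile p = l.drop (l.takeWhile p).length := by
  conv_lhs => rw [show l.dropWhile p = (l.takeWhile p ++ l.dropWhile p).drop (l.takeWhile p).length from
    List.drop_left.symm, List.takeWhile_append_dropWhile]

lemma pvGetD_set (l : List Bool) (i k : Nat) :
    (l.set i true).getD k false = if i = k ∧ i < l.length then true else l.getD k false := by
  simp [List.getD_eq_getElem?_getD, List.getElem?_set]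
  split_ifs with h1 h2 <;> simp_all

-- characterization of pvInner started at j with fuel data.length - j
lemma pvInner_spec (data : List Int) (thresh : Int) :
    ∀ f j val e flag, f = data.length - j → j ≤ data.length → flag.length = data.length →
      ∃ F : List Bool,
        pvInner data thresh f j val e flag =
          (val + ((data.drop j).takeWhile (fun y => thresh ≤ y)).sum,
           (if ((data.drop j).takeWhile (fun y => thresh ≤ y)).length = 0 then e
            else j + ((data.drop j).takeWhile (fun y => thresh ≤ y)).length - 1), F) ∧
        F.length = data.length ∧
        ∀ k, F.getD k false =
          (flag.getD k false || decide (j ≤ k ∧ k < j + ((data.drop j).takeWhile (fun y => thresh ≤ y)).length)) := by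
  intro f
  induction f with
  | zero =>
    intro j val e flag hf hj hlen
    have hjn : j = data.length := by omega
    refine ⟨flag, ?_, hlen, ?_⟩
    · subst hjn; simp [pvInner]
    · intro k; subst hjn; simp
  | succ f ih =>
    intro j val e flag hf hj hlen
    have hjlt : j < data.length := by omega
    have hdrop : data.drop j = data[j] :: data.drop (j + 1) := List.drop_eq_getElem_cons hjlt
    have hgetD : data.getD j 0 = data[j] := List.getD_eq_getElem data 0 hjlt
    by_cases hx : thresh ≤ data[j]
    · -- element joins the run
      have ht : (data.drop j).takeWhile (fun y => thresh ≤ y)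
          = data[j] :: (data.drop (j + 1)).takeWhile (fun y => thresh ≤ y) := by
        rw [hdrop, List.takeWhile_cons_of_pos (by simpa using hx)]
      obtain ⟨F, hrec, hFlen, hFget⟩ :=
        ih (j + 1) (val + data[j]) j (flag.set j true) (by omega) (by omega) (by simpa using hlen)
      refine ⟨F, ?_, hFlen, ?_⟩
      · have hunf : pvInner data thresh (f + 1) j val e flag
            = if data.getD j 0 ≥ thresh then pvInner data thresh f (j + 1) (val + data.getD j 0) j (flag.set j true) else (val, e, flag) := rfl
        rw [hunf, hgetD, if_pos (show data[j] ≥ thresh from hx), hrec, ht]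
        refine congrArg₂ Prod.mk ?_ (congrArg₂ Prod.mk ?_ rfl)
        · rw [List.sum_cons]; ring
        · rw [List.length_cons]
          split_ifs <;> first | exact (‹False›).elim | omega
      · intro k
        rw [hFget k, pvGetD_set, ht]
        rcases Nat.lt_trichotomy k j with h | h | h
        · have : ¬ (j = k ∧ j < flag.length) := by omega
          simp only [this, if_false]
          have h1 : ¬ (j + 1 ≤ k) := by omega
          have h2 : ¬ (j ≤ k) := by omega
          simp [h1, h2]
        · subst h
          rw [if_pos ⟨rfl, by omega⟩]
          simp only [Bool.true_or, List.length_cons]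
          symm
          rw [Bool.or_eq_true]
          right
          rw [decide_eq_true_eq]
          omega
        · have : ¬ (j = k ∧ j < flag.length) := by omega
          rw [if_neg this, List.length_cons]
          have hiff : (j + 1 ≤ k ∧ k < j + 1 + ((data.drop (j+1)).takeWhile (fun y => thresh ≤ y)).length)
              ↔ (j ≤ k ∧ k < j + (((data.drop (j+1)).takeWhile (fun y => thresh ≤ y)).length + 1)) := by omega
          rw [decide_eq_decide.mpr hiff]
    · -- run ends here
      have ht : (data.drop j).takeWhile (fun y => thresh ≤ y) = [] := by
        rw [hdrop]; simp [hx]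
      refine ⟨flag, ?_, hlen, ?_⟩
      · have hunf : pvInner data thresh (f + 1) j val e flag
            = if data.getD j 0 ≥ thresh then pvInner data thresh f (j + 1) (val + data.getD j 0) j (flag.set j true) else (val, e, flag) := rfl
        rw [hunf, hgetD, if_neg (show ¬ data[j] ≥ thresh from hx), ht]; simp
      · intro k; rw [ht]; simp

-- the A-side main lemma: outer loop at i, where flags are true on [i, m) and false on [m, len)
lemma pvOuter_spec (data : List Int) (thresh : Int) :
    ∀ f i m blocks flag, f = data.length - i → i ≤ m → m ≤ data.length → flag.length = data.length →
      (∀ k, i ≤ k → k < m → flag.getD k false = true) →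
      (∀ k, m ≤ k → k < data.length → flag.getD k false = false) →
      pvOuter data thresh f i blocks flag = blocks ++ pvRuns thresh (data.drop m) m := by
  intro f
  induction f with
  | zero =>
    intro i m blocks flag hf him hmn hlen h1 h2
    have : m = data.length := by omega
    subst this
    simp [pvOuter, pvRuns]
  | succ f ih =>
    intro i m blocks flag hf him hmn hlen h1 h2
    have hin : i < data.length := by omega
    have hgetD : data.getD i 0 = data[i] := List.getD_eq_getElem data 0 hin
    have hunfO : pvOuter data thresh (f + 1) i blocks flag
        = if data.getD i 0 ≥ thresh ∧ flag.getD i false = false then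
            pvOuter data thresh f (i + 1)
              (if i ≠ (pvInner data thresh (data.length - (i + 1)) (i + 1) (data.getD i 0) i flag).2.1
               then blocks ++ [(((i : Int),
                      ((pvInner data thresh (data.length - (i + 1)) (i + 1) (data.getD i 0) i flag).2.1 : Int)),
                      (pvInner data thresh (data.length - (i + 1)) (i + 1) (data.getD i 0) i flag).1)]
               else blocks)
              ((pvInner data thresh (data.length - (i + 1)) (i + 1) (data.getD i 0) i flag).2.2.set i true)
          else pvOuter data thresh f (i + 1) blocks (flag.set i true) := rfl
    rcases Nat.lt_or_ge i m with hlt | hge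
    · -- i < m : flag[i] is true, skip
      have hfi : flag.getD i false = true := h1 i le_rfl hlt
      have hcond : ¬ (data.getD i 0 ≥ thresh ∧ flag.getD i false = false) := by
        rw [hfi]; simp
      rw [hunfO, if_neg hcond]
      refine ih (i + 1) m blocks (flag.set i true) (by omega) (by omega) hmn (by simpa using hlen) ?_ ?_
      · intro k hk1 hk2
        rw [pvGetD_set]
        split_ifs with h
        · rfl
        · exact h1 k (by omega) hk2
      · intro k hk1 hk2
        rw [pvGetD_set]
        split_ifs with h
        · omega
        · exact h2 k hk1 hk2
    · -- i = m
      have him' : i = m := by omega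
      subst him'
      have hfi : flag.getD i false = false := h2 i le_rfl hin
      have hdrop : data.drop i = data[i] :: data.drop (i + 1) := List.drop_eq_getElem_cons hin
      by_cases hx : thresh ≤ data[i]
      · -- a run starts at i
        obtain ⟨F, hrec, hFlen, hFget⟩ :=
          pvInner_spec data thresh (data.length - (i + 1)) (i + 1) data[i] i flag rfl (by omega) hlen
        have hcond : (data.getD i 0 ≥ thresh ∧ flag.getD i false = false) := ⟨by rw [hgetD]; exact hx, hfi⟩
        set t := (data.drop (i + 1)).takeWhile (fun y => thresh ≤ y) with htdef
        have htlen : t.length ≤ data.length - (i + 1) := by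
          have := (List.takeWhile_sublist (l := data.drop (i + 1)) (fun y => thresh ≤ y)).length_le
          simpa [← htdef] using this
        have he' : (if t.length = 0 then i else i + 1 + t.length - 1) = i + t.length := by
          split_ifs <;> omega
        rw [hunfO, if_pos hcond]
        rw [hgetD, hrec]
        simp only [he']
        have hdd : (data.drop (i + 1)).drop t.length = data.drop (i + 1 + t.length) := by
          rw [List.drop_drop]
        have ihres := ih (i + 1) (i + 1 + t.length)
          (if i ≠ i + t.length
           then blocks ++ [(((i : Int), ((i + t.length : Nat) : Int)), data[i] + t.sum)]
           else blocks)
          (F.set i true) (by omega) (by omega) (by omega) (by simpa using hFlen) ?_ ?_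
        · rw [ihres]
          rw [show pvRuns thresh (data.drop i) i
              = (if t.length = 0 then []
                 else [(((i : Int), ((i + t.length : Nat) : Int)), data[i] + t.sum)])
                ++ pvRuns thresh (data.drop (i + 1 + t.length)) (i + 1 + t.length) by
                rw [hdrop, pvRuns, if_pos hx, ← htdef,
                  pvDropWhile_eq_drop, ← htdef, hdd]]
          rcases Nat.eq_zero_or_pos t.length with hz | hz
          · rw [if_neg (by omega), if_pos hz]; simp
          · rw [if_pos (by omega), if_neg (by omega)]; simp
        · intro k hk1 hk2
          rw [pvGetD_set]
          split_ifs with h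
          · rfl
          · rw [hFget k]
            have hmem : (i + 1 ≤ k ∧ k < i + 1 + t.length) := ⟨hk1, hk2⟩
            simp [hmem]
        · intro k hk1 hk2
          rw [pvGetD_set]
          split_ifs with h
          · omega
          · rw [hFget k]
            have hnot : ¬ (i + 1 ≤ k ∧ k < i + 1 + t.length) := by omega
            simp only [hnot, decide_false, Bool.or_false]
            exact h2 k (by omega) hk2
      · -- no run at i
        have hcond : ¬ (data.getD i 0 ≥ thresh ∧ flag.getD i false = false) := by
          rw [hgetD]; intro h; exact hx h.1
        rw [hunfO, if_neg hcond]
        rw [show pvRuns thresh (data.drop i) i = pvRuns thresh (data.drop (i + 1)) (i + 1) by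
          rw [hdrop, pvRuns, if_neg (by simpa using hx)]]
        refine ih (i + 1) (i + 1) blocks (flag.set i true) (by omega) le_rfl (by omega) (by simpa using hlen) ?_ ?_
        · intro k hk1 hk2; omega
        · intro k hk1 hk2
          rw [pvGetD_set]
          split_ifs with h
          · omega
          · exact h2 k (by omega) hk2

-- B-side: run the fold then flush, as get_stran_alt does
def pvFoldFin (thresh : Int) (el : List (Nat × Int)) (acc : List ((Int × Int) × Int) × Option Nat × Nat × Int) :
    List ((Int × Int) × Int) :=
  let fin := el.foldl (pvAltStep thresh) acc
  pvFlush fin.1 fin.2.1 fin.2.2.1 fin.2.2.2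

-- closed-state and open-state invariants of B's pass, proved together by strong induction on the list
lemma pvAlt_spec (thresh : Int) :
    ∀ N l, l.length ≤ N →
      ((∀ i blocks e val,
        pvFoldFin thresh (pvEnum i l) (blocks, none, e, val) = blocks ++ pvRuns thresh l i) ∧
      (∀ s e val blocks,
        pvFoldFin thresh (pvEnum (e + 1) l) (blocks, some s, e, val) =
          (if s = e + (l.takeWhile (fun y => thresh ≤ y)).length then blocks
           else blocks ++ [(((s : Int), ((e + (l.takeWhile (fun y => thresh ≤ y)).length : Nat) : Int)),
                            val + (l.takeWhile (fun y => thresh ≤ y)).sum)])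
            ++ pvRuns thresh (l.dropWhile (fun y => thresh ≤ y)) (e + 1 + (l.takeWhile (fun y => thresh ≤ y)).length))) := by
  intro N
  induction N with
  | zero =>
    intro l hl
    have : l = [] := List.length_eq_zero_iff.mp (by omega)
    subst this
    constructor
    · intro i blocks e val; simp [pvFoldFin, pvEnum, pvFlush, pvRuns]
    · intro s e val blocks
      by_cases h : s = e
      · simp [pvFoldFin, pvEnum, pvFlush, pvRuns, h]
      · simp [pvFoldFin, pvEnum, pvFlush, pvRuns, h]
  | succ N ih =>
    intro l hl
    rcases l with _ | ⟨x, rest⟩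
    · exact ih [] (by simp)
    constructor
    · -- closed state
      intro i blocks e val
      by_cases hx : thresh ≤ x
      · have hstep : pvAltStep thresh (blocks, none, e, val) (i, x) = (blocks, some i, i, x) := by
          simp [pvAltStep, hx]
        rw [show pvFoldFin thresh (pvEnum i (x :: rest)) (blocks, none, e, val)
            = pvFoldFin thresh (pvEnum (i + 1) rest) (blocks, some i, i, x) by
              simp [pvFoldFin, pvEnum, List.foldl_cons, hstep]]
        rw [(ih rest (by simpa using hl)).2 i i x blocks]
        rw [show pvRuns thresh (x :: rest) i
            = (if (rest.takeWhile (fun y => thresh ≤ y)).length = 0 then []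
               else [(((i : Int), ((i + (rest.takeWhile (fun y => thresh ≤ y)).length : Nat) : Int)),
                      x + (rest.takeWhile (fun y => thresh ≤ y)).sum)])
              ++ pvRuns thresh (rest.dropWhile (fun y => thresh ≤ y))
                  (i + 1 + (rest.takeWhile (fun y => thresh ≤ y)).length) by
              rw [pvRuns, if_pos hx]]
        rcases Nat.eq_zero_or_pos (rest.takeWhile (fun y => thresh ≤ y)).length with hz | hz
        · rw [if_pos (by omega), if_pos hz]; simp
        · rw [if_neg (by omega), if_neg (by omega)]; simp
      · have hstep : pvAltStep thresh (blocks, none, e, val) (i, x) = (blocks, none, e, val) := by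
          simp [pvAltStep, hx, pvFlush]
        rw [show pvFoldFin thresh (pvEnum i (x :: rest)) (blocks, none, e, val)
            = pvFoldFin thresh (pvEnum (i + 1) rest) (blocks, none, e, val) by
              simp [pvFoldFin, pvEnum, List.foldl_cons, hstep]]
        rw [(ih rest (by simpa using hl)).1 (i + 1) blocks e val]
        rw [show pvRuns thresh (x :: rest) i = pvRuns thresh rest (i + 1) by
          rw [pvRuns, if_neg (by simpa using hx)]]
    · -- open state: run from s with last index e, next element x at index e + 1
      intro s e val blocks
      by_cases hx : thresh ≤ x
      · have hstep : pvAltStep thresh (blocks, some s, e, val) (e + 1, x) = (blocks, some s, e + 1, val + x) := by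
          simp [pvAltStep, hx]
        rw [show pvFoldFin thresh (pvEnum (e + 1) (x :: rest)) (blocks, some s, e, val)
            = pvFoldFin thresh (pvEnum ((e + 1) + 1) rest) (blocks, some s, e + 1, val + x) by
              simp [pvFoldFin, pvEnum, List.foldl_cons, hstep]]
        rw [(ih rest (by simpa using hl)).2 s (e + 1) (val + x) blocks]
        rw [show (x :: rest).takeWhile (fun y => thresh ≤ y) = x :: rest.takeWhile (fun y => thresh ≤ y) from
          List.takeWhile_cons_of_pos (by simpa using hx)]
        rw [show (x :: rest).dropWhile (fun y => thresh ≤ y) = rest.dropWhile (fun y => thresh ≤ y) from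
          List.dropWhile_cons_of_pos (by simpa using hx)]
        have harith : e + 1 + (rest.takeWhile (fun y => thresh ≤ y)).length
            = e + (x :: rest.takeWhile (fun y => thresh ≤ y)).length := by
          rw [List.length_cons]; omega
        rw [harith]
        have hsum : val + x + (rest.takeWhile (fun y => thresh ≤ y)).sum
            = val + (x :: rest.takeWhile (fun y => thresh ≤ y)).sum := by
          rw [List.sum_cons]; ring
        rw [hsum]
        have harith2 : e + 1 + 1 + (rest.takeWhile (fun y => thresh ≤ y)).length
            = e + 1 + (x :: rest.takeWhile (fun y => thresh ≤ y)).length := by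
          rw [List.length_cons]; omega
        rw [harith2]
      · have hstep : pvAltStep thresh (blocks, some s, e, val) (e + 1, x)
            = (pvFlush blocks (some s) e val, none, e, val) := by
          simp [pvAltStep, hx]
        rw [show pvFoldFin thresh (pvEnum (e + 1) (x :: rest)) (blocks, some s, e, val)
            = pvFoldFin thresh (pvEnum ((e + 1) + 1) rest) (pvFlush blocks (some s) e val, none, e, val) by
              simp [pvFoldFin, pvEnum, List.foldl_cons, hstep]]
        rw [(ih rest (by simpa using hl)).1 ((e + 1) + 1) (pvFlush blocks (some s) e val) e val]
        rw [show (x :: rest).takeWhile (fun y => thresh ≤ y) = [] from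
          List.takeWhile_cons_of_neg (by simpa using hx)]
        rw [show (x :: rest).dropWhile (fun y => thresh ≤ y) = x :: rest from
          List.dropWhile_cons_of_neg (by simpa using hx)]
        simp only [List.length_nil, List.sum_nil, Nat.add_zero]
        rw [show pvRuns thresh (x :: rest) (e + 1) = pvRuns thresh rest (e + 1 + 1) by
          rw [pvRuns, if_neg hx]]
        by_cases h : s = e
        · rw [if_pos h]; simp [pvFlush, h]
        · rw [if_neg h]; simp [pvFlush, h]

-- ===== VERDICT (by name: the statement is the Claim_ definition above) =====
theorem get_stran_spec : Claim_equal_get_stran := by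
  intro data thresh _
  unfold Spec_get_stran get_stran
  rw [show get_stran_alt data thresh = pvFoldFin thresh (pvEnum 0 data) ([], none, 0, 0) from rfl]
  rw [((pvAlt_spec thresh data.length data le_rfl).1 0 [] 0 0)]
  have := pvOuter_spec data thresh data.length 0 0 [] (List.replicate data.length false)
    (by omega) le_rfl (Nat.zero_le _) (by simp)
    (by intro k hk1 hk2; omega)
    (by intro k hk1 hk2; simp [List.getD_eq_getElem?_getD, hk2])
  simpa using this
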